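-- pv_equiv track=rewrite | github.com/dev2pew/promptify | src/promptify/core/mods.py | parse_incomplete_git_branch_prefix
-- ===== SOURCE A (Python) =====
-- def parse_incomplete_git_branch_prefix(body: str) -> str | None:
--     """Return the raw branch partial while the user is still typing `[branch`"""
--     if not body.startswith("["):
--         return None
--
--     raw_chars: list[str] = []
--     escaped = False
--     for char in body[1:]:
--         if escaped:
--             raw_chars.extend(["\\", char])
--             escaped = False
--             continue
--         if char == "\\":
--             escaped = True
--             continue
--         if char in {"]", ":"}:
--             return None
--         raw_chars.append(char)
--
--     if escaped:
--         raw_chars.append("\\")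
--     return "".join(raw_chars)
-- ===== SOURCE B (Python) =====
-- def parse_incomplete_git_branch_prefix(body: str) -> str | None:
--     """Return the raw branch partial while the user is still typing `[branch`"""
--     if not body.startswith("["):
--         return None
--     # Scan for an unescaped ']' or ':'; the result, if any, is just body[1:].
--     escaped = False
--     for char in body[1:]:
--         if escaped:
--             escaped = False
--         elif char == "\\":
--             escaped = True
--         elif char in "]:":
--             return None
--     return body[1:]
-- ===== Notes on version B (the rewrite author's own statement) =====
-- stated objective: simpler
-- what changed: B replaces A's per-character output accumulation (raw_chars list with extend/append and a final join) by a pure validity scan with one escaped flag and returns body[1:] by slicing, since the copied characters always reproduce the input verbatim.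
import Mathlib
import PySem

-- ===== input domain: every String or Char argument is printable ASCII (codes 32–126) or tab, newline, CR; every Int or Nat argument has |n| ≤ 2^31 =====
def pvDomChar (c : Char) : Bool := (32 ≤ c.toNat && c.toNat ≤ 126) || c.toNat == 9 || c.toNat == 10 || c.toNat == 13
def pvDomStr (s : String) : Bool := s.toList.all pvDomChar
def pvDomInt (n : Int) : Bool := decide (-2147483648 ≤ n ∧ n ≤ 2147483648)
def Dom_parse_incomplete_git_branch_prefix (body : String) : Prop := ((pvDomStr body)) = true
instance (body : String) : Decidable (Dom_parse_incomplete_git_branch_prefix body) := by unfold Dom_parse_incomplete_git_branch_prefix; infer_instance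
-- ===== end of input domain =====

-- B replaces A's per-character output accumulation by a pure validity scan and returns body[1:] by slicing.

-- ===== PORT A =====
-- A's for-loop with its raw_chars accumulator and escaped flag; early 'return None' = none.
def pvALoop : List Char → List Char → Bool → Option (List Char)
  | [], raw_chars, escaped => some (if escaped then raw_chars ++ ['\\'] else raw_chars)
  | c :: cs, raw_chars, escaped =>
    if escaped then pvALoop cs (raw_chars ++ ['\\', c]) false
    else if c = '\\' then pvALoop cs raw_chars true
    else if c = ']' ∨ c = ':' then none
    else pvALoop cs (raw_chars ++ [c]) false

def parse_incomplete_git_branch_prefix (body : String) : Option String :=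
  if ¬ PySem.Str.startswith body "[" then none
  else (pvALoop (PySem.List.slice body.toList (some 1) none) [] false).map String.ofList

-- ===== PORT B =====
-- B's scan: only the escaped flag, no accumulation; true = no unescaped ']' or ':'.
def pvBScan : List Char → Bool → Bool
  | [], _ => true
  | c :: cs, escaped =>
    if escaped then pvBScan cs false
    else if c = '\\' then pvBScan cs true
    else if c = ']' ∨ c = ':' then false
    else pvBScan cs false

def parse_incomplete_git_branch_prefix_alt (body : String) : Option String :=
  if ¬ PySem.Str.startswith body "[" then none
  else
    let rest := PySem.List.slice body.toList (some 1) none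
    if pvBScan rest false then some (String.ofList rest) else none

-- ===== PRECONDITION & SPEC =====
def Spec_parse_incomplete_git_branch_prefix (body : String) (out : Option String) : Prop := out = parse_incomplete_git_branch_prefix_alt body
instance (body : String) (out : Option String) : Decidable (Spec_parse_incomplete_git_branch_prefix body out) := by unfold Spec_parse_incomplete_git_branch_prefix; infer_instance

-- ===== CLAIM (what is proved, stated in full; the proofs are below) =====
def Claim_equal_parse_incomplete_git_branch_prefix : Prop := ∀ (body : String), Dom_parse_incomplete_git_branch_prefix body → Spec_parse_incomplete_git_branch_prefix body (parse_incomplete_git_branch_prefix body)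

-- ===== LEMMAS AND PROOFS =====
-- Invariant: A's loop returns exactly the remaining input (with the pending backslash restored)
-- appended to the accumulator iff B's scan accepts, else none.
theorem pvALoop_eq (cs : List Char) : ∀ (acc : List Char) (esc : Bool),
    pvALoop cs acc esc =
      if pvBScan cs esc then some (acc ++ (if esc then '\\' :: cs else cs)) else none := by
  induction cs with
  | nil => intro acc esc; cases esc <;> simp [pvALoop, pvBScan]
  | cons c cs ih =>
    intro acc esc
    cases esc with
    | true => simp [pvALoop, pvBScan, ih]
    | false =>
      by_cases hb : c = '\\'
      · simp [pvALoop, pvBScan, hb, ih]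
      · by_cases hd : c = ']' ∨ c = ':'
        · simp [pvALoop, pvBScan, hb, hd]
        · simp [pvALoop, pvBScan, hb, hd, ih]

-- ===== VERDICT (by name: the statement is the Claim_ definition above) =====
theorem parse_incomplete_git_branch_prefix_spec : Claim_equal_parse_incomplete_git_branch_prefix := by
  intro body _
  unfold Spec_parse_incomplete_git_branch_prefix parse_incomplete_git_branch_prefix parse_incomplete_git_branch_prefix_alt
  rw [pvALoop_eq]
  split_ifs <;> simp_all
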